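-- pv_equiv track=rewrite | github.com/curzel-it/bit-therapy | Scripts/lang.py | grouped_keys_by_section
-- ===== SOURCE A (Python) =====
-- def grouped_keys_by_section(keys):
--     sections = [section_name(key) for key in keys]
--     sections = sorted(list(set(sections)))
--     sections = {section: [] for section in sections}
--
--     for key in keys:
--         section = section_name(key)
--         sections[section].append(key)
--     sections.pop('species', None)
--     sections.pop('menu', None)
--     return sections
--
-- def section_name(key):
--     if '.' not in key: return ''
--     return key.split('.')[0]
-- ===== SOURCE B (Python) =====
-- def grouped_keys_by_section(keys):
--     # Sort by section (stable, so keys keep their original order within each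
--     # section), then collect consecutive runs of equal sections in one scan.
--     ordered = sorted(keys, key=section_name)
--     groups = {}
--     i = 0
--     n = len(ordered)
--     while i < n:
--         section = section_name(ordered[i])
--         j = i
--         while j < n and section_name(ordered[j]) == section:
--             j += 1
--         if section not in ('species', 'menu'):
--             groups[section] = ordered[i:j]
--         i = j
--     return groups
--
-- def section_name(key):
--     if '.' not in key: return ''
--     return key.split('.')[0]
-- ===== Notes on version B (the rewrite author's own statement) =====
-- stated objective: alternative
-- what changed: Replaces A's collect-distinct-sections / pre-allocate-sorted-empty-buckets / second-fill-pass strategy with a sort-then-scan: stably sort the keys by section, then sweep once collecting consecutive runs of equal section (skipping 'species' and 'menu') -- correctness rests on sort stability.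
import Mathlib
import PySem

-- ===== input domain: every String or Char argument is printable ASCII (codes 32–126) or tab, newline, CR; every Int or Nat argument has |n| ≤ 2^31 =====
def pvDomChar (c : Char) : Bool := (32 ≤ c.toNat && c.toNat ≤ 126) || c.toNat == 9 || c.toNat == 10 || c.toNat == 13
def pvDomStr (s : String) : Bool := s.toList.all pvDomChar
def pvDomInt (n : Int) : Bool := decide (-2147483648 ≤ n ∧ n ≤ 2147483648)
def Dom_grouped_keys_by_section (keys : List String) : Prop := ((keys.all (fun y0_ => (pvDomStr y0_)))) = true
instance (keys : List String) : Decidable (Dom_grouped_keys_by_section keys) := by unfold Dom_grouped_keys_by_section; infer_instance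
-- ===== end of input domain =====

-- ===== PORT A =====
-- B re-implements A by stable-sorting the keys by section and collecting consecutive
-- runs in one scan, instead of A's distinct-section precomputation and second fill pass.

-- shared module helper section_name (used by both Pythons):
-- '.' not in key / key.split('.')[0]; the separator "." is nonempty so split? is
-- always `some`, and a split result is nonempty, so neither default is ever used.
def sectionName (key : String) : String :=
  if !(PySem.Str.isIn "." key) then ""
  else ((PySem.Str.split? key ".").getD []).headD ""

def grouped_keys_by_section (keys : List String) : List (String × List String) :=
  let sections1 := keys.map sectionName
  let sections2 := PySem.List.sorted (PySem.Set.ofList sections1) (fun s => s) false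
  let d0 : PySem.Dict String (List String) :=
    sections2.foldl (fun d s => d.insert s []) (PySem.Dict.mk [])
  -- sections[section].append(key): section is always a key of the dict here,
  -- so modify's [] default is never used
  let d1 := keys.foldl (fun d key => d.modify (sectionName key) [] (fun l => l ++ [key])) d0
  ((d1.erase "species").erase "menu").items

-- ===== PORT B =====
-- the outer while-loop of Source B: each step takes the run of keys sharing the head's
-- section (inner while j) and, unless the section is 'species'/'menu', records it
def gbLoop (rest : List String) (groups : PySem.Dict String (List String)) :
    PySem.Dict String (List String) :=
  match rest with
  | [] => groups
  | y :: t =>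
    let sect := sectionName y
    let run := y :: t.takeWhile (fun z => sectionName z == sect)
    let rest' := t.dropWhile (fun z => sectionName z == sect)
    gbLoop rest' (if sect == "species" || sect == "menu" then groups
                  else groups.insert sect run)
termination_by rest.length
decreasing_by simp only [List.length_cons]; exact Nat.lt_succ_of_le (List.length_dropWhile_le _ t)

def grouped_keys_by_section_alt (keys : List String) : List (String × List String) :=
  let ordered := PySem.List.sorted keys sectionName false
  (gbLoop ordered (PySem.Dict.mk [])).items

-- ===== PRECONDITION & SPEC =====
def Spec_grouped_keys_by_section (keys : List String) (out : List (String × List String)) : Prop := out = grouped_keys_by_section_alt keys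
instance (keys : List String) (out : List (String × List String)) : Decidable (Spec_grouped_keys_by_section keys out) := by unfold Spec_grouped_keys_by_section; infer_instance

-- ===== CLAIM (what is proved, stated in full; the proofs are below) =====
def Claim_equal_grouped_keys_by_section : Prop := ∀ (keys : List String), Dom_grouped_keys_by_section keys → Spec_grouped_keys_by_section keys (grouped_keys_by_section keys)

-- ===== LEMMAS AND PROOFS =====

theorem set_add_mem {s : List String} {x : String} (h : x ∈ s) : PySem.Set.add s x = s := by
  simp [PySem.Set.add, PySem.Set.contains, h]

theorem set_add_cons {a x : String} (s : List String) (h : x ≠ a) :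
    PySem.Set.add (a :: s) x = a :: PySem.Set.add s x := by
  simp only [PySem.Set.add, PySem.Set.contains, List.contains_cons]
  simp [h]
  split <;> rfl

theorem foldl_add_skip (L1 L2 acc : List String) (h : ∀ x ∈ L1, x ∈ acc) :
    List.foldl PySem.Set.add acc (L1 ++ L2) = List.foldl PySem.Set.add acc L2 := by
  induction L1 with
  | nil => rfl
  | cons x t ih =>
      simp only [List.cons_append, List.foldl_cons, set_add_mem (h x (by simp))]
      exact ih (fun z hz => h z (by simp [hz]))

theorem foldl_add_cons (a : String) (L : List String) (s : List String) (h : a ∉ L) :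
    List.foldl PySem.Set.add (a :: s) L = a :: List.foldl PySem.Set.add s L := by
  induction L generalizing s with
  | nil => rfl
  | cons x t ih =>
      have hx : x ≠ a := by rintro rfl; exact h (by simp)
      simp only [List.foldl_cons, set_add_cons s hx]
      exact ih _ (fun hz => h (by simp [hz]))

theorem ofList_cons_group (a : String) (tw r : List String)
    (h1 : ∀ x ∈ tw, x = a) (h2 : a ∉ r) :
    PySem.Set.ofList (a :: (tw ++ r)) = a :: PySem.Set.ofList r := by
  show List.foldl PySem.Set.add [] (a :: (tw ++ r)) = a :: List.foldl PySem.Set.add [] r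
  simp only [List.foldl_cons]
  have : PySem.Set.add [] a = [a] := rfl
  rw [this, foldl_add_skip tw r [a] (fun x hx => by simp [h1 x hx]), foldl_add_cons a r [] h2]

theorem foldl_add_sublist (L acc : List String) :
    (List.foldl PySem.Set.add acc L).Sublist (acc ++ L) := by
  induction L generalizing acc with
  | nil => simp
  | cons x t ih =>
      simp only [List.foldl_cons]
      refine (ih (PySem.Set.add acc x)).trans ?_
      by_cases hx : x ∈ acc
      · rw [set_add_mem hx]
        exact (List.append_sublist_append_left _).mpr (List.sublist_cons_self _ _)
      · show (PySem.Set.add acc x ++ t).Sublist (acc ++ x :: t)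
        rw [show PySem.Set.add acc x = acc ++ [x] by simp [PySem.Set.add, PySem.Set.contains, hx]]
        simp

theorem dict_insert_fresh (d : PySem.Dict String (List String)) (k : String) (v : List String)
    (h : d.contains k = false) : (d.insert k v).items = d.items ++ [(k, v)] := by
  simp [PySem.Dict.insert, h]

theorem dict_contains_of_mem (L : List (String × List String)) (t : String)
    (h : t ∈ L.map Prod.fst) : (PySem.Dict.mk L).contains t = true := by
  rcases List.mem_map.mp h with ⟨q, hq, hq1⟩
  simp only [PySem.Dict.contains, List.any_eq_true]
  exact ⟨q, hq, by simp [hq1]⟩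

theorem modify_items (L : List (String × List String)) (t : String) (f : List String → List String)
    (hnd : (L.map Prod.fst).Nodup) (ht : t ∈ L.map Prod.fst) :
    ((PySem.Dict.mk L).modify t [] f).items = L.map (fun p => if p.1 = t then (p.1, f p.2) else p) := by
  induction L with
  | nil => simp at ht
  | cons p L' ih =>
      simp only [List.map_cons, List.nodup_cons, List.mem_map] at hnd ht
      by_cases hp : p.1 = t
      · -- head is the match
        have hgd : (PySem.Dict.mk (p :: L')).getD t [] = p.2 := by
          simp [PySem.Dict.getD, PySem.Dict.get?, hp]
        have hc : (PySem.Dict.mk (p :: L')).contains t = true := by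
          simp [PySem.Dict.contains, hp]
        simp only [PySem.Dict.modify, PySem.Dict.insert, hc, if_true, hgd]
        have htail : ∀ q ∈ L', q.1 ≠ t := by
          intro q hq he
          exact hnd.1 ⟨q, hq, by rw [he, hp]⟩
        simp only [List.map_cons]
        congr 1
        · simp [hp]
        · apply List.map_congr_left
          intro q hq
          simp [htail q hq]
      · -- head is not the match
        have ht' : t ∈ List.map Prod.fst L' := by
          rcases List.mem_cons.mp ht with h | h
          · exact absurd h.symm hp
          · exact h
        have hgd : (PySem.Dict.mk (p :: L')).getD t [] = (PySem.Dict.mk L').getD t [] := by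
          simp [PySem.Dict.getD, PySem.Dict.get?,
                show (p.1 == t) = false by simp [hp]]
        have hc : (PySem.Dict.mk (p :: L')).contains t = true :=
          dict_contains_of_mem _ _ (by simpa using Or.inr ht')
        have hstep := ih hnd.2 ht'
        simp only [PySem.Dict.modify, PySem.Dict.insert, hc, if_true, hgd] at hstep ⊢
        have hc' : (PySem.Dict.mk L').contains t = true :=
          dict_contains_of_mem _ _ ht'
        simp only [hc', if_true] at hstep
        simp only [List.map_cons, show (p.1 == t) = false by simp [hp]]
        simp only [Bool.false_eq_true, if_false]
        rw [show (if p.1 = t then (p.1, f p.2) else p) = p by simp [hp]]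
        exact congrArg (p :: ·) hstep

theorem init_items (S : List String) (d : PySem.Dict String (List String))
    (hd : ∀ s ∈ S, d.contains s = false) (hnd : S.Nodup) :
    (S.foldl (fun d s => d.insert s []) d).items
      = d.items ++ S.map (fun s => (s, ([] : List String))) := by
  induction S generalizing d with
  | nil => simp
  | cons s S' ih =>
      simp only [List.foldl_cons, List.map_cons]
      have hfresh := dict_insert_fresh d s [] (hd s (by simp))
      have hd' : ∀ s' ∈ S', (d.insert s []).contains s' = false := by
        intro s' hs'
        have hne : s' ≠ s := by rintro rfl; exact (List.nodup_cons.mp hnd).1 hs'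
        simp only [PySem.Dict.contains, hfresh, List.any_append, List.any_cons]
        have h1 : d.contains s' = false := hd s' (by simp [hs'])
        simp only [PySem.Dict.contains] at h1
        simp [h1, Ne.symm hne]
      rw [ih _ hd' (List.nodup_cons.mp hnd).2, hfresh]
      simp

theorem fill_items (sec : String → String) (keys : List String) (L : List (String × List String))
    (hnd : (L.map Prod.fst).Nodup) (hin : ∀ k ∈ keys, sec k ∈ L.map Prod.fst) :
    (keys.foldl (fun d k => d.modify (sec k) [] (fun l => l ++ [k])) (PySem.Dict.mk L)).items
      = L.map (fun p => (p.1, p.2 ++ keys.filter (fun k => sec k == p.1))) := by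
  induction keys generalizing L with
  | nil => simp
  | cons k ks ih =>
      simp only [List.foldl_cons]
      have hstep := modify_items L (sec k) (fun l => l ++ [k]) hnd (hin k (by simp))
      have hdict : (PySem.Dict.mk L).modify (sec k) [] (fun l => l ++ [k])
          = PySem.Dict.mk (L.map (fun p => if p.1 = sec k then (p.1, p.2 ++ [k]) else p)) := by
        rw [← hstep]
      rw [hdict]
      set L' := L.map (fun p => if p.1 = sec k then (p.1, p.2 ++ [k]) else p) with hL'
      have hfst : L'.map Prod.fst = L.map Prod.fst := by
        rw [hL', List.map_map]
        apply List.map_congr_left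
        intro p _
        by_cases hp : p.1 = sec k <;> simp [hp]
      rw [ih L' (by rw [hfst]; exact hnd) (fun k' hk' => by rw [hfst]; exact hin k' (by simp [hk']))]
      rw [hL', List.map_map]
      apply List.map_congr_left
      intro p _
      by_cases hp : p.1 = sec k
      · simp [Function.comp, hp, List.append_assoc]
      · have : (sec k == p.1) = false := by simp; exact fun h => hp h.symm
        simp [Function.comp, hp, this]

theorem A_char (keys : List String) :
    grouped_keys_by_section keys
      = ((PySem.List.sorted (PySem.Set.ofList (keys.map sectionName)) (fun s => s) false).filter
            (fun s => !(s == "menu") && !(s == "species"))).map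
          (fun s => (s, keys.filter (fun k => sectionName k == s))) := by
  unfold grouped_keys_by_section
  dsimp only []
  set S2 := PySem.List.sorted (PySem.Set.ofList (keys.map sectionName)) (fun s => s) false with hS2
  have hnd : S2.Nodup :=
    (PySem.List.sorted_perm _ _ _).symm.nodup (PySem.Set.nodup_ofList _)
  have h0 : (S2.foldl (fun d s => d.insert s []) (PySem.Dict.mk [])).items
      = S2.map (fun s => (s, ([] : List String))) := by
    rw [init_items S2 (PySem.Dict.mk []) (fun s _ => by simp [PySem.Dict.contains]) hnd]
    rfl
  have h0' : S2.foldl (fun d s => d.insert s []) (PySem.Dict.mk [])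
      = PySem.Dict.mk (S2.map (fun s => (s, ([] : List String)))) := by rw [← h0]
  rw [h0']
  have hfst : (S2.map (fun s => (s, ([] : List String)))).map Prod.fst = S2 := by
    rw [List.map_map, show (Prod.fst ∘ fun s : String => (s, ([] : List String))) = id from rfl,
        List.map_id]
  have h1 := fill_items sectionName keys (S2.map (fun s => (s, ([] : List String))))
    (by rw [hfst]; exact hnd)
    (by intro k hk
        rw [hfst, hS2, PySem.List.mem_sorted]
        exact (PySem.Set.mem_ofList _ _).mpr (List.mem_map_of_mem hk))
  have h1'' : (keys.foldl (fun d k => d.modify (sectionName k) [] (fun l => l ++ [k]))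
        (PySem.Dict.mk (S2.map (fun s => (s, ([] : List String)))))).items
      = S2.map (fun s => (s, keys.filter (fun k => sectionName k == s))) := by
    rw [h1, List.map_map]
    exact List.map_congr_left (fun s _ => by simp)
  have h1' : keys.foldl (fun d k => d.modify (sectionName k) [] (fun l => l ++ [k]))
        (PySem.Dict.mk (S2.map (fun s => (s, ([] : List String)))))
      = PySem.Dict.mk (S2.map (fun s => (s, keys.filter (fun k => sectionName k == s)))) := by
    rw [← h1'']
  rw [h1']
  simp only [PySem.Dict.erase, List.filter_filter, List.filter_map]
  rfl

theorem dropWhile_head_false {α : Type} (p : α → Bool) :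
    ∀ (l : List α) {z : α} {rr : List α}, List.dropWhile p l = z :: rr → p z = false := by
  intro l
  induction l with
  | nil => simp [List.dropWhile]
  | cons a l ih =>
      intro z rr h
      by_cases hp : p a = true
      · rw [List.dropWhile_cons_of_pos hp] at h
        exact ih h
      · rw [List.dropWhile_cons_of_neg (by simpa using hp)] at h
        cases h
        simpa using hp

theorem insertBy_filter (x s : String) (acc : List String)
    (h : acc.Pairwise (fun a b => sectionName a ≤ sectionName b)) :
    (PySem.List.insertBy (fun a b => decide (sectionName a < sectionName b)) x acc).filter
        (fun k => sectionName k == s)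
      = acc.filter (fun k => sectionName k == s) ++ [x].filter (fun k => sectionName k == s) := by
  induction acc with
  | nil => simp [PySem.List.insertBy]
  | cons y acc' ih =>
      rw [List.pairwise_cons] at h
      by_cases hlt : sectionName x < sectionName y
      · simp only [PySem.List.insertBy, hlt, decide_true, if_true]
        by_cases hx : sectionName x == s
        · -- everything in y :: acc' has section > s, so it is filtered out
          have hnil : (y :: acc').filter (fun k => sectionName k == s) = [] := by
            rw [List.filter_eq_nil_iff]
            intro z hz
            have hyz : sectionName y ≤ sectionName z := by
              rcases List.mem_cons.mp hz with rfl | hz'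
              · exact le_refl _
              · exact h.1 z hz'
            have : sectionName z ≠ s := by
              have hxs : sectionName x = s := by simpa using hx
              intro hzs
              exact absurd (hzs ▸ (lt_of_lt_of_le hlt hyz)) (by simp [hxs])
            simp [this]
          simp [hx, hnil]
        · simp only [Bool.not_eq_true] at hx
          simp [List.filter_cons, hx]
      · simp only [PySem.List.insertBy, hlt, decide_false, Bool.false_eq_true, if_false]
        rw [List.filter_cons]
        rw [ih h.2]
        by_cases hy : sectionName y == s <;> simp [hy]

theorem stable_filter (xs : List String) (s : String) :
    (PySem.List.sorted xs sectionName false).filter (fun k => sectionName k == s)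
      = xs.filter (fun k => sectionName k == s) := by
  induction xs using List.reverseRecOn with
  | nil => rfl
  | append_singleton xs x ih =>
      rw [PySem.List.sorted_eq_foldl_insertBy, List.foldl_append, List.foldl_cons, List.foldl_nil,
          ← PySem.List.sorted_eq_foldl_insertBy]
      rw [insertBy_filter x s _ (PySem.List.sorted_pairwise xs sectionName), ih]
      simp [List.filter_append]

theorem sorted_set_eq (keys : List String) :
    PySem.List.sorted (PySem.Set.ofList (keys.map sectionName)) (fun s => s) false
      = PySem.Set.ofList ((PySem.List.sorted keys sectionName false).map sectionName) := by
  apply PySem.List.sorted_eq_of_perm_of_pairwise_lt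
  · rw [List.perm_ext_iff_of_nodup (PySem.Set.nodup_ofList _) (PySem.Set.nodup_ofList _)]
    intro a
    rw [PySem.Set.mem_ofList, PySem.Set.mem_ofList]
    constructor <;>
      · intro h
        rcases List.mem_map.mp h with ⟨k, hk, rfl⟩
        exact List.mem_map_of_mem (by simp [PySem.List.mem_sorted] at hk ⊢; exact hk)
  · -- Set.ofList of a Pairwise-(≤) list is Pairwise (<): it is a Nodup sublist
    have hsub : (PySem.Set.ofList ((PySem.List.sorted keys sectionName false).map sectionName)).Sublist
        ((PySem.List.sorted keys sectionName false).map sectionName) := by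
      have := foldl_add_sublist ((PySem.List.sorted keys sectionName false).map sectionName) []
      simpa using this
    have hle := (PySem.List.sorted_map_key_pairwise keys sectionName).sublist hsub
    have hne := List.nodup_iff_pairwise_ne.mp (PySem.Set.nodup_ofList
      ((PySem.List.sorted keys sectionName false).map sectionName))
    exact (hle.and hne).imp (fun h => lt_of_le_of_ne h.1 h.2)

theorem gbLoop_items (ys : List String) (d : PySem.Dict String (List String))
    (hpw : (ys.map sectionName).Pairwise (· ≤ ·))
    (hd : ∀ y ∈ ys, d.contains (sectionName y) = false) :
    (gbLoop ys d).items
      = d.items ++ ((PySem.Set.ofList (ys.map sectionName)).filter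
            (fun s => !(s == "species" || s == "menu"))).map
          (fun s => (s, ys.filter (fun k => sectionName k == s))) := by
  induction ys, d using gbLoop.induct with
  | case1 d => simp [gbLoop, PySem.Set.ofList]
  | case2 d y t sect run rest' ih =>
      have hsect : sect = sectionName y := rfl
      have hrun : run = y :: t.takeWhile (fun z => sectionName z == sect) := rfl
      have hrest' : rest' = t.dropWhile (fun z => sectionName z == sect) := rfl
      set tw := t.takeWhile (fun z => sectionName z == sect) with htw
      have ht_split : tw ++ rest' = t := List.takeWhile_append_dropWhile
      have f1 : ∀ z ∈ tw, sectionName z = sect := by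
        intro z hz
        simpa using List.mem_takeWhile_imp hz
      have hpw' : (t.map sectionName).Pairwise (· ≤ ·) ∧
          ∀ b ∈ t.map sectionName, sect ≤ b := by
        rw [List.map_cons, List.pairwise_cons] at hpw
        exact ⟨hpw.2, hpw.1⟩
      have sub_r' : rest'.Sublist t := List.dropWhile_sublist _
      have hpw_r' : (rest'.map sectionName).Pairwise (· ≤ ·) :=
        hpw'.1.sublist (sub_r'.map _)
      have f2 : ∀ z ∈ rest', sect < sectionName z := by
        cases hr : rest' with
        | nil => simp
        | cons z0 rr =>
            intro z hz
            have hz0f : (sectionName z0 == sect) = false :=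
              dropWhile_head_false (fun z => sectionName z == sect) t (by rw [← hrest']; exact hr)
            have hz0 : sect < sectionName z0 := by
              have hle : sect ≤ sectionName z0 :=
                hpw'.2 _ (List.mem_map_of_mem (sub_r'.mem (by simp [hr])))
              exact lt_of_le_of_ne hle (fun he => by simp [← he] at hz0f)
            rcases List.mem_cons.mp hz with rfl | hz'
            · exact hz0
            · have : sectionName z0 ≤ sectionName z := by
                have := hpw_r'
                rw [hr, List.map_cons, List.pairwise_cons] at this
                exact this.1 _ (List.mem_map_of_mem hz')
              exact lt_of_lt_of_le hz0 this
      have f5 : PySem.Set.ofList ((y :: t).map sectionName)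
          = sect :: PySem.Set.ofList (rest'.map sectionName) := by
        rw [List.map_cons, ← ht_split, List.map_append, ← hsect]
        exact ofList_cons_group sect _ _ (fun x hx => by
            rcases List.mem_map.mp hx with ⟨z, hz, rfl⟩; exact f1 z hz)
          (fun hx => by
            rcases List.mem_map.mp hx with ⟨z, hz, he⟩
            exact absurd he (ne_of_gt (f2 z hz)))
      have f4 : ∀ s ∈ PySem.Set.ofList (rest'.map sectionName),
          (y :: t).filter (fun k => sectionName k == s)
            = rest'.filter (fun k => sectionName k == s) := by
        intro s hs
        rcases List.mem_map.mp ((PySem.Set.mem_ofList _ _).mp hs) with ⟨z, hz, rfl⟩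
        have hys : sect < sectionName z := f2 z hz
        rw [List.filter_cons, ← ht_split, List.filter_append]
        have h1 : (sectionName y == sectionName z) = false := by
          simp [← hsect]; exact ne_of_lt hys
        have h2 : tw.filter (fun k => sectionName k == sectionName z) = [] := by
          rw [List.filter_eq_nil_iff]
          intro a ha
          simp [f1 a ha]
          exact ne_of_lt hys
        simp [h1, h2]
      have f3 : (y :: t).filter (fun k => sectionName k == sect) = run := by
        rw [hrun, List.filter_cons, ← ht_split, List.filter_append]
        have h1 : (sectionName y == sect) = true := beq_self_eq_true _
        have h2 : tw.filter (fun k => sectionName k == sect) = tw :=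
          List.filter_eq_self.mpr (fun a ha => by simp [f1 a ha])
        have h3 : rest'.filter (fun k => sectionName k == sect) = [] := by
          rw [List.filter_eq_nil_iff]
          intro a ha
          simp
          exact (ne_of_gt (f2 a ha))
        simp [h1, h2, h3]
      -- one unfolding step of gbLoop
      rw [show gbLoop (y :: t) d = gbLoop rest'
            (if h : (sect == "species" || sect == "menu") = true then d
             else d.insert sect run) by
          rw [gbLoop]
          by_cases h : (sect == "species" || sect == "menu") = true
          · rw [if_pos h, dif_pos h]
          · rw [if_neg h, dif_neg h]]
      by_cases hbad : (sect == "species" || sect == "menu") = true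
      · rw [dif_pos hbad] at ih ⊢
        rw [ih hpw_r' (fun z hz => hd z (List.mem_cons_of_mem _ (sub_r'.mem hz)))]
        rw [f5, List.filter_cons, show (!(sect == "species" || sect == "menu")) = false by simp [hbad]]
        simp only [Bool.false_eq_true, if_false]
        congr 1
        apply List.map_congr_left
        intro s hs
        rw [f4 s (List.mem_of_mem_filter hs)]
      · rw [dif_neg hbad] at ih ⊢
        have hfresh := dict_insert_fresh d sect run (hd y (by simp))
        rw [ih hpw_r' (fun z hz => by
          have hz' : sect ≠ sectionName z := ne_of_lt (f2 z hz)
          have h0 : d.contains (sectionName z) = false :=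
            hd z (List.mem_cons_of_mem _ (sub_r'.mem hz))
          simp only [PySem.Dict.contains] at h0 ⊢
          rw [hfresh, List.any_append]
          simp [h0, hz'])]
        rw [hfresh, f5, List.filter_cons,
            show (!(sect == "species" || sect == "menu")) = true by simp [hbad]]
        simp only [if_true, List.map_cons, List.append_assoc, List.singleton_append, f3]
        congr 2
        apply List.map_congr_left
        intro s hs
        rw [f4 s (List.mem_of_mem_filter hs)]

-- ===== VERDICT (by name: the statement is the Claim_ definition above) =====
theorem grouped_keys_by_section_spec : Claim_equal_grouped_keys_by_section := by
  intro keys _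
  unfold Spec_grouped_keys_by_section
  rw [A_char]
  unfold grouped_keys_by_section_alt
  dsimp only []
  rw [gbLoop_items _ _ (PySem.List.sorted_map_key_pairwise keys sectionName)
      (fun y _ => by simp [PySem.Dict.contains])]
  rw [sorted_set_eq]
  have hpred : ∀ s ∈ PySem.Set.ofList
        ((PySem.List.sorted keys sectionName false).map sectionName),
      (!(s == "menu") && !(s == "species")) = (!(s == "species" || s == "menu")) := by
    intro s _
    cases h1 : s == "species" <;> cases h2 : s == "menu" <;> rfl
  rw [List.filter_congr hpred]
  rw [show (PySem.Dict.mk ([] : List (String × List String))).items = [] from rfl,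
      List.nil_append]
  apply List.map_congr_left
  intro s _
  rw [stable_filter]
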